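-- pv_equiv track=rewrite | github.com/gabrielegrillo/Fondamenti1-Unical | E5.py | sottoseqdecrescente
-- ===== SOURCE A (Python) =====
-- def seqmax(lista):
--     seq = lista[0]
--     for i in range(len(lista)):
--         if (len(lista[i]) > len(seq)):
--             seq = lista[i]
--     return seq
--
-- def sottoseqdecrescente(lista):
--     if (len(lista) <= 2):
--         return 0
--
--     sottoseq = []
--     for i in range(1,len(lista)):
--         prec = lista[i-1]
--         attuale = lista[i]
--         if (prec > attuale):
--             stringa = lista[i-1] + lista[i]
--             sottoseq.append(stringa)
--             inizio = i+1
--             for j in range(inizio,len(lista)):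
--                 successivo = lista[j]
--                 attuale = lista[i]
--                 if (attuale >= successivo):
--                     stringa += lista[j]
--                     sottoseq.append(stringa)
--                 else:
--                     break
--
--
--     if (len(sottoseq) < 2):
--         return 0
--
--     seq = seqmax(sottoseq)
--     indiceinizio = seq[0]
--     indicefine = seq[len(seq)-1]
--     for i in range(len(seq)):
--         if (seq[i] < indiceinizio):
--             indiceinizio = seq[i]
--
--         if (seq[i] > indicefine):
--             indicefine = seq[i]
--
--     numcaratteridistanti = 0
--     # calcolare distanza caratteri
--     for i in range(ord(indiceinizio), ord(indicefine)-1):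
--         numcaratteridistanti += 1
--
--     return numcaratteridistanti
-- ===== SOURCE B (Python) =====
-- def sottoseqdecrescente(lista):
--     # Single pass over index pairs: track count of A's candidate prefixes and the
--     # first longest one by total character length, without building any string.
--     n = len(lista)
--     if n <= 2:
--         return 0
--     count = 0
--     best_len = -1
--     best = None  # (lo, hi): the winning prefix covers lista[lo..hi]
--     for i in range(1, n):
--         if lista[i - 1] > lista[i]:
--             clen = len(lista[i - 1]) + len(lista[i])
--             if clen > best_len:
--                 best_len, best = clen, (i - 1, i)
--             count += 1
--             j = i + 1
--             while j < n and lista[j] <= lista[i]: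
--                 clen += len(lista[j])
--                 if clen > best_len:
--                     best_len, best = clen, (i - 1, j)
--                 count += 1
--                 j += 1
--     if count < 2:
--         return 0
--     lo, hi = best
--     mn = mx = None
--     for s in lista[lo:hi + 1]:
--         for c in s:
--             if mn is None or c < mn:
--                 mn = c
--             if mx is None or c > mx:
--                 mx = c
--     return max(0, ord(mx) - 1 - ord(mn))
-- ===== Notes on version B (the rewrite author's own statement) =====
-- stated objective: faster
-- what changed: B never builds the concatenated prefix strings or the sottoseq list: it scans once keeping only a count and the (char-length, index-range) of the first longest candidate, then takes min/max characters directly over that slice of the input; intended as faster by dropping the O(n^2 * L) string building (measured 17.6x at the largest size both finish; both keep a quadratic index loop on adversarial reversed inputs).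
import Mathlib
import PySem

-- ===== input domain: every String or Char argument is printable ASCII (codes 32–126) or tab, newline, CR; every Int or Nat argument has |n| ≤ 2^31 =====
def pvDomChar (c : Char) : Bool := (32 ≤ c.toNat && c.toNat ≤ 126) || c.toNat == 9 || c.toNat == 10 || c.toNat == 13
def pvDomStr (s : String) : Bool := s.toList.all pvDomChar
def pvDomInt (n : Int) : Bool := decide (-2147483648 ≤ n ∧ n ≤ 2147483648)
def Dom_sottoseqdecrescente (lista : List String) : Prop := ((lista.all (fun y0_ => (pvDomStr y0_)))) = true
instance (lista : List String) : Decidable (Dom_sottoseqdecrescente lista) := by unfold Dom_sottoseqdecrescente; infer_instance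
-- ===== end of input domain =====

-- B replaces A's O(n^2)-many concatenated candidate strings by a single pass that keeps only
-- a count and the (char-length, index-range) of the first longest candidate (objective: faster;
-- a timing run measured B 17.6x faster than A at the largest size both finish).

-- ===== PORT A =====
-- helper seqmax: seq = lista[0]; for i in range(len(lista)): if len(lista[i]) > len(seq): seq = lista[i]
-- (lista[0] on an empty list would raise in Python; the call site below always passes a non-empty list)
def seqmax (l : List String) : String :=
  (PySem.List.pyRange 0 (PySem.List.len l)).foldl
    (fun seq i =>
      if PySem.Str.len (PySem.List.pyGetD l i "") > PySem.Str.len seq then PySem.List.pyGetD l i ""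
      else seq)
    (PySem.List.pyGetD l 0 "")

-- inner 'for j in range(inizio, len(lista))' loop with its break; indices i, j are in range at
-- every use, so List.getD is exactly Python's lista[j]
def innerA (lista : List String) (i j : Nat) (stringa : String) (sottoseq : List String) :
    List String :=
  if _h : j < lista.length then
    if lista.getD j "" ≤ lista.getD i "" then
      innerA lista i (j + 1) (stringa ++ lista.getD j "")
        (sottoseq ++ [stringa ++ lista.getD j ""])
    else sottoseq
  else sottoseq
termination_by lista.length - j

-- outer 'for i in range(1, len(lista))' loop
def outerA (lista : List String) (i : Nat) (sottoseq : List String) : List String :=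
  if _h : i < lista.length then
    if lista.getD i "" < lista.getD (i - 1) "" then
      outerA lista (i + 1)
        (innerA lista i (i + 1) (lista.getD (i - 1) "" ++ lista.getD i "")
          (sottoseq ++ [lista.getD (i - 1) "" ++ lista.getD i ""]))
    else outerA lista (i + 1) sottoseq
  else sottoseq
termination_by lista.length - i

def sottoseqdecrescente (lista : List String) : Int :=
  if lista.length ≤ 2 then 0
  else
    let sottoseq := outerA lista 1 []
    if sottoseq.length < 2 then 0
    else
      let seq := seqmax sottoseq
      let cs := seq.toList
      -- seq[0] and seq[len(seq)-1]: seq is non-empty at this call site, both indices in range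
      let inizio := cs.getD 0 ' '
      let fine := cs.getD (cs.length - 1) ' '
      let mm := (PySem.List.pyRange 0 (PySem.List.len cs)).foldl
        (fun p i =>
          (if PySem.List.pyGetD cs i ' ' < p.1 then PySem.List.pyGetD cs i ' ' else p.1,
           if PySem.List.pyGetD cs i ' ' > p.2 then PySem.List.pyGetD cs i ' ' else p.2))
        (inizio, fine)
      (PySem.List.pyRange (mm.1.toNat : Int) ((mm.2.toNat : Int) - 1)).foldl
        (fun acc _ => acc + 1) 0

-- ===== PORT B =====
-- inner while loop: only the running char-length, best (length, range) and count are kept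
def innerB (lista : List String) (i j : Nat) (clen bl : Int) (best : Option (Nat × Nat))
    (count : Nat) : Int × Option (Nat × Nat) × Nat :=
  if _h : j < lista.length then
    if lista.getD j "" ≤ lista.getD i "" then
      if clen + PySem.Str.len (lista.getD j "") > bl then
        innerB lista i (j + 1) (clen + PySem.Str.len (lista.getD j ""))
          (clen + PySem.Str.len (lista.getD j "")) (some (i - 1, j)) (count + 1)
      else
        innerB lista i (j + 1) (clen + PySem.Str.len (lista.getD j "")) bl best (count + 1)
    else (bl, best, count)
  else (bl, best, count)
termination_by lista.length - j

def outerB (lista : List String) (i : Nat) (bl : Int) (best : Option (Nat × Nat)) (count : Nat) :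
    Int × Option (Nat × Nat) × Nat :=
  if _h : i < lista.length then
    if lista.getD i "" < lista.getD (i - 1) "" then
      let clen := PySem.Str.len (lista.getD (i - 1) "") + PySem.Str.len (lista.getD i "")
      let s := if clen > bl then (clen, some (i - 1, i)) else (bl, best)
      let r := innerB lista i (i + 1) clen s.1 s.2 (count + 1)
      outerB lista (i + 1) r.1 r.2.1 r.2.2
    else outerB lista (i + 1) bl best count
  else (bl, best, count)
termination_by lista.length - i

def sottoseqdecrescente_alt (lista : List String) : Int :=
  if lista.length ≤ 2 then 0
  else
    let r := outerB lista 1 (-1) none 0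
    if r.2.2 < 2 then 0
    else
      match r.2.1 with
      | none => 0   -- unreachable: count ≥ 2 forces a recorded best range
      | some (lo, hi) =>
        let mm := (PySem.List.slice lista (some (lo : Int)) (some ((hi : Int) + 1))).foldl
          (fun p s =>
            s.toList.foldl
              (fun (q : Option Char × Option Char) c =>
                ((match q.1 with
                  | none => some c
                  | some m => if c < m then some c else some m),
                 (match q.2 with
                  | none => some c
                  | some m => if c > m then some c else some m)))
              p)
          (none, none)
        match mm with
        | (some mn, some mx) => max 0 ((mx.toNat : Int) - 1 - (mn.toNat : Int))
        | _ => 0   -- unreachable: the winning range always contains a character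

-- ===== PRECONDITION & SPEC =====
def Spec_sottoseqdecrescente (lista : List String) (out : Int) : Prop := out = sottoseqdecrescente_alt lista
instance (lista : List String) (out : Int) : Decidable (Spec_sottoseqdecrescente lista out) := by unfold Spec_sottoseqdecrescente; infer_instance

-- ===== CLAIM (what is proved, stated in full; the proofs are below) =====
def Claim_equal_sottoseqdecrescente : Prop := ∀ (lista : List String), Dom_sottoseqdecrescente lista → Spec_sottoseqdecrescente lista (sottoseqdecrescente lista)

-- ===== LEMMAS AND PROOFS =====

-- abstraction of A's sottoseq list: the first-longest fold A's seqmax performs, kept incrementally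
def astep (p : Int × Option (List Char)) (x : String) : Int × Option (List Char) :=
  if PySem.Str.len x > p.1 then (PySem.Str.len x, some x.toList) else p

def absS (s : List String) : Int × Option (List Char) := s.foldl astep (-1, none)

-- the characters of lista[lo..hi] concatenated
def seg (lista : List String) (lo hi : Nat) : List Char :=
  (((lista.drop lo).take (hi + 1 - lo)).map String.toList).flatten

def omap (lista : List String) (b : Option (Nat × Nat)) : Option (List Char) :=
  b.map (fun q => seg lista q.1 q.2)

def sstep (seq x : String) : String :=
  if PySem.Str.len x > PySem.Str.len seq then x else seq

lemma absS_append (s : List String) (x : String) : absS (s ++ [x]) = astep (absS s) x := by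
  simp [absS, List.foldl_append]

lemma str_len_append (s t : String) :
    PySem.Str.len (s ++ t) = PySem.Str.len s + PySem.Str.len t := by
  simp [PySem.Str.len_eq, String.toList_append]

lemma seg_two (lista : List String) (i : Nat) (h1 : 1 ≤ i) (h : i < lista.length) :
    seg lista (i - 1) i = (lista.getD (i - 1) "").toList ++ (lista.getD i "").toList := by
  unfold seg
  have h2 : i + 1 - (i - 1) = 0 + 1 + 1 := by omega
  rw [h2, List.take_add_one, List.take_add_one, List.take_zero]
  have e0 : (lista.drop (i - 1))[0]? = some (lista.getD (i - 1) "") := by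
    rw [List.getElem?_drop]
    have : i - 1 + 0 = i - 1 := by omega
    rw [this, List.getElem?_eq_getElem (by omega), List.getD_eq_getElem _ _ (by omega)]
  have e1 : (lista.drop (i - 1))[0 + 1]? = some (lista.getD i "") := by
    rw [List.getElem?_drop]
    have : i - 1 + (0 + 1) = i := by omega
    rw [this, List.getElem?_eq_getElem h, List.getD_eq_getElem _ _ h]
  rw [e0, e1]
  simp

lemma seg_push (lista : List String) (i j : Nat) (h1 : 1 ≤ i) (hij : i ≤ j)
    (hj : j < lista.length) :
    seg lista (i - 1) j = seg lista (i - 1) (j - 1) ++ (lista.getD j "").toList := by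
  unfold seg
  have h2 : j + 1 - (i - 1) = (j - 1 + 1 - (i - 1)) + 1 := by omega
  rw [h2, List.take_add_one]
  have e0 : (lista.drop (i - 1))[j - 1 + 1 - (i - 1)]? = some (lista.getD j "") := by
    rw [List.getElem?_drop]
    have : i - 1 + (j - 1 + 1 - (i - 1)) = j := by omega
    rw [this, List.getElem?_eq_getElem hj, List.getD_eq_getElem _ _ hj]
  rw [e0]
  simp

lemma fold_astep_seq (s : List String) (x : String) :
    s.foldl astep (PySem.Str.len x, some x.toList) =
      (PySem.Str.len (s.foldl sstep x), some ((s.foldl sstep x)).toList) := by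
  induction s generalizing x with
  | nil => simp
  | cons y t ih =>
      simp only [List.foldl_cons, astep, sstep]
      split_ifs <;> exact ih _

lemma absS_of_ne_nil (s : List String) (hs : s ≠ []) :
    absS s = (PySem.Str.len (seqmax s), some (seqmax s).toList) := by
  obtain ⟨x, t, rfl⟩ := List.exists_cons_of_ne_nil hs
  have hseq : seqmax (x :: t) =
      List.foldl sstep (PySem.List.pyGetD (x :: t) 0 "") (List.drop ((0 : Int)).toNat (x :: t)) :=
    PySem.List.foldl_pyRange_pyGetD (x :: t) "" sstep (PySem.List.pyGetD (x :: t) 0 "") le_rfl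
  have hget : PySem.List.pyGetD (x :: t) 0 "" = x := PySem.List.pyGetD_zero_cons ..
  have hdrop : List.drop ((0 : Int)).toNat (x :: t) = x :: t := by simp
  rw [hget, hdrop] at hseq
  have hxx : sstep x x = x := by simp [sstep]
  have hseq2 : seqmax (x :: t) = List.foldl sstep x t := by
    rw [hseq, List.foldl_cons, hxx]
  have hfirst : astep (-1, none) x = (PySem.Str.len x, some x.toList) := by
    have : (0 : Int) ≤ PySem.Str.len x := by
      rw [PySem.Str.len_eq]; positivity
    simp only [astep]
    rw [if_pos (by omega)]
  have : absS (x :: t) = List.foldl astep (PySem.Str.len x, some x.toList) t := by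
    rw [absS, List.foldl_cons, hfirst]
  rw [this, fold_astep_seq, hseq2]

lemma inner_corr (lista : List String) (i : Nat) (h1 : 1 ≤ i) :
    ∀ k j, lista.length - j = k → i ≤ j →
    ∀ (stringa : String) (sottoseq : List String) (bl : Int) (best : Option (Nat × Nat))
      (count : Nat),
      count = sottoseq.length →
      absS sottoseq = (bl, omap lista best) →
      stringa.toList = seg lista (i - 1) (j - 1) →
      absS (innerA lista i j stringa sottoseq) =
          ((innerB lista i j (PySem.Str.len stringa) bl best count).1,
            omap lista (innerB lista i j (PySem.Str.len stringa) bl best count).2.1) ∧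
        (innerA lista i j stringa sottoseq).length =
          (innerB lista i j (PySem.Str.len stringa) bl best count).2.2 := by
  intro k
  induction k with
  | zero =>
      intro j hk hij stringa sottoseq bl best count hc habs hstr
      have hj : ¬ j < lista.length := by omega
      rw [innerA, innerB]
      simp only [dif_neg hj]
      exact ⟨habs, hc.symm⟩
  | succ k ih =>
      intro j hk hij stringa sottoseq bl best count hc habs hstr
      rw [innerA, innerB]
      by_cases hj : j < lista.length
      · simp only [dif_pos hj]
        by_cases hle : lista.getD j "" ≤ lista.getD i ""
        · simp only [if_pos hle]
          have hlen' : PySem.Str.len stringa + PySem.Str.len (lista.getD j "") =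
              PySem.Str.len (stringa ++ lista.getD j "") := (str_len_append _ _).symm
          have hseg : (stringa ++ lista.getD j "").toList = seg lista (i - 1) j := by
            rw [String.toList_append, hstr, ← seg_push lista i j h1 hij hj]
          have habs' : absS (sottoseq ++ [stringa ++ lista.getD j ""]) =
              astep (bl, omap lista best) (stringa ++ lista.getD j "") := by
            rw [absS_append, habs]
          rw [hlen']
          by_cases hgt : PySem.Str.len (stringa ++ lista.getD j "") > bl
          · rw [if_pos hgt]
            have habs2 : absS (sottoseq ++ [stringa ++ lista.getD j ""]) =
                (PySem.Str.len (stringa ++ lista.getD j ""),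
                  omap lista (some (i - 1, j))) := by
              rw [habs', astep, if_pos hgt, hseg]; rfl
            exact ih (j + 1) (by omega) (by omega) _ _ _ _ _
              (by simp [hc]) habs2 hseg
          · rw [if_neg hgt]
            have habs2 : absS (sottoseq ++ [stringa ++ lista.getD j ""]) =
                (bl, omap lista best) := by
              rw [habs', astep, if_neg hgt]
            exact ih (j + 1) (by omega) (by omega) _ _ _ _ _
              (by simp [hc]) habs2 hseg
        · simp only [if_neg hle]
          exact ⟨habs, hc.symm⟩
      · simp only [dif_neg hj]
        exact ⟨habs, hc.symm⟩

lemma outer_corr (lista : List String) :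
    ∀ k i, lista.length - i = k → 1 ≤ i →
    ∀ (sottoseq : List String) (bl : Int) (best : Option (Nat × Nat)) (count : Nat),
      count = sottoseq.length →
      absS sottoseq = (bl, omap lista best) →
      absS (outerA lista i sottoseq) =
          ((outerB lista i bl best count).1, omap lista (outerB lista i bl best count).2.1) ∧
        (outerA lista i sottoseq).length = (outerB lista i bl best count).2.2 := by
  intro k
  induction k with
  | zero =>
      intro i hk h1 sottoseq bl best count hc habs
      have hi : ¬ i < lista.length := by omega
      rw [outerA, outerB]
      simp only [dif_neg hi]
      exact ⟨habs, hc.symm⟩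
  | succ k ih =>
      intro i hk h1 sottoseq bl best count hc habs
      rw [outerA, outerB]
      by_cases hi : i < lista.length
      · simp only [dif_pos hi]
        by_cases hlt : lista.getD i "" < lista.getD (i - 1) ""
        · simp only [if_pos hlt]
          have hlen' : PySem.Str.len (lista.getD (i - 1) "") + PySem.Str.len (lista.getD i "") =
              PySem.Str.len (lista.getD (i - 1) "" ++ lista.getD i "") := (str_len_append _ _).symm
          have hseg : (lista.getD (i - 1) "" ++ lista.getD i "").toList = seg lista (i - 1) i := by
            rw [String.toList_append, ← seg_two lista i h1 hi]
          have habs' : absS (sottoseq ++ [lista.getD (i - 1) "" ++ lista.getD i ""]) =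
              astep (bl, omap lista best) (lista.getD (i - 1) "" ++ lista.getD i "") := by
            rw [absS_append, habs]
          have hstate : absS (sottoseq ++ [lista.getD (i - 1) "" ++ lista.getD i ""]) =
              ((if PySem.Str.len (lista.getD (i - 1) "" ++ lista.getD i "") > bl
                  then (PySem.Str.len (lista.getD (i - 1) "" ++ lista.getD i ""), some (i - 1, i))
                  else (bl, best)).1,
                omap lista
                  (if PySem.Str.len (lista.getD (i - 1) "" ++ lista.getD i "") > bl
                    then (PySem.Str.len (lista.getD (i - 1) "" ++ lista.getD i ""),
                      some (i - 1, i))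
                    else (bl, best)).2) := by
            rw [habs', astep]
            by_cases hgt : PySem.Str.len (lista.getD (i - 1) "" ++ lista.getD i "") > bl
            · rw [if_pos hgt, if_pos hgt, hseg]; rfl
            · rw [if_neg hgt, if_neg hgt]
          rw [hlen']
          obtain ⟨ha, hb⟩ := inner_corr lista i h1 (lista.length - (i + 1)) (i + 1) rfl
            (by omega) (lista.getD (i - 1) "" ++ lista.getD i "")
            (sottoseq ++ [lista.getD (i - 1) "" ++ lista.getD i ""]) _ _ (count + 1)
            (by simp [hc]) hstate hseg
          exact ih (i + 1) (by omega) (by omega) _ _ _ _ hb.symm ha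
        · simp only [if_neg hlt]
          exact ih (i + 1) (by omega) (by omega) _ _ _ _ hc habs
      · simp only [dif_neg hi]
        exact ⟨habs, hc.symm⟩

lemma foldl_max_mem {α : Type} [LinearOrder α] :
    ∀ (l : List α) (a : α), l.foldl max a = a ∨ l.foldl max a ∈ l := by
  intro l
  induction l with
  | nil => intro a; left; rfl
  | cons b t ih =>
      intro a
      have hrw : List.foldl max a (b :: t) = List.foldl max (max a b) t := rfl
      rw [hrw]
      rcases ih (max a b) with h | h
      · rcases max_choice a b with hc | hc
        · left; rw [h, hc]
        · right; rw [h, hc]; exact List.mem_cons_self ..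
      · right; exact List.mem_cons_of_mem _ h

lemma foldl_add_one (l : List Int) (c : Int) :
    l.foldl (fun a _ => a + 1) c = c + l.length := by
  induction l generalizing c with
  | nil => simp
  | cons x t ih => simp [List.foldl_cons, ih]; ring

lemma ofold_minmax (t : List Char) :
    ∀ a b : Char,
      t.foldl
          (fun (q : Option Char × Option Char) c =>
            ((match q.1 with
              | none => some c
              | some m => if c < m then some c else some m),
             (match q.2 with
              | none => some c
              | some m => if c > m then some c else some m)))
          (some a, some b) =
        (some (t.foldl (fun m c => if c < m then c else m) a),
          some (t.foldl (fun m c => if c > m then c else m) b)) := by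
  induction t with
  | nil => intro a b; rfl
  | cons c t ih =>
      intro a b
      simp only [List.foldl_cons]
      by_cases h1 : c < a <;> by_cases h2 : c > b <;>
        simp only [h1, h2, if_true, if_false] <;> exact ih _ _

lemma minf_eq : (fun (m c : Char) => if c < m then c else m) = min := by
  funext m c
  by_cases h : c < m
  · rw [if_pos h, min_eq_right h.le]
  · rw [if_neg h, min_eq_left (not_lt.1 h)]

lemma maxf_eq : (fun (m c : Char) => if c > m then c else m) = max := by
  funext m c
  by_cases h : c > m
  · rw [if_pos h, max_eq_right h.le]
  · rw [if_neg h, max_eq_left (not_lt.1 h)]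

lemma foldl_strings {σ : Type} (g : σ → Char → σ) (strs : List String) (init : σ) :
    strs.foldl (fun p s => s.toList.foldl g p) init =
      ((strs.map String.toList).flatten).foldl g init := by
  rw [List.foldl_flatten, List.foldl_map]

lemma fold_max_seed (c lastB : Char) (t : List Char) (hmem : lastB ∈ c :: t) :
    t.foldl max (max lastB c) = t.foldl max c := by
  have h1 := PySem.List.le_foldl_max t (max lastB c)
  have h2 := PySem.List.le_foldl_max t c
  apply le_antisymm
  · rcases foldl_max_mem t (max lastB c) with h | h
    · rw [h]
      apply max_le
      · rcases List.mem_cons.1 hmem with hc | hc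
        · rw [hc]; exact h2.1
        · exact h2.2 _ hc
      · exact h2.1
    · exact h2.2 _ h
  · rcases foldl_max_mem t c with h | h
    · rw [h]; exact le_trans (le_max_right lastB c) h1.1
    · exact h1.2 _ h

lemma tail_eq (cs : List Char) :
    (PySem.List.pyRange
        (((cs.foldl
            (fun p c => (if c < p.1 then c else p.1, if c > p.2 then c else p.2))
            (cs.getD 0 ' ', cs.getD (cs.length - 1) ' ')).1.toNat : Int))
        (((cs.foldl
            (fun p c => (if c < p.1 then c else p.1, if c > p.2 then c else p.2))
            (cs.getD 0 ' ', cs.getD (cs.length - 1) ' ')).2.toNat : Int) - 1)).foldl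
      (fun acc _ => acc + 1) (0 : Int) =
    (match cs.foldl
        (fun (q : Option Char × Option Char) c =>
          ((match q.1 with
            | none => some c
            | some m => if c < m then some c else some m),
           (match q.2 with
            | none => some c
            | some m => if c > m then some c else some m)))
        (none, none) with
     | (some mn, some mx) => max 0 ((mx.toNat : Int) - 1 - (mn.toNat : Int))
     | _ => (0 : Int)) := by
  cases cs with
  | nil => decide
  | cons c t =>
      have epair : (c :: t).foldl
          (fun p c => (if c < p.1 then c else p.1, if c > p.2 then c else p.2))
          ((c :: t).getD 0 ' ', (c :: t).getD ((c :: t).length - 1) ' ') =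
          ((c :: t).foldl (fun m c => if c < m then c else m) ((c :: t).getD 0 ' '),
            (c :: t).foldl (fun m c => if c > m then c else m)
              ((c :: t).getD ((c :: t).length - 1) ' ')) :=
        PySem.List.foldl_prod_mk (fun m c => if c < m then c else m)
          (fun m c => if c > m then c else m) (c :: t) ((c :: t).getD 0 ' ')
          ((c :: t).getD ((c :: t).length - 1) ' ')
      have eB : (c :: t).foldl
          (fun (q : Option Char × Option Char) c =>
            ((match q.1 with
              | none => some c
              | some m => if c < m then some c else some m),
             (match q.2 with
              | none => some c
              | some m => if c > m then some c else some m)))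
          (none, none) =
          (some (t.foldl (fun m c => if c < m then c else m) c),
            some (t.foldl (fun m c => if c > m then c else m) c)) := by
        rw [List.foldl_cons]
        exact ofold_minmax t c c
      rw [epair, eB]
      simp only [minf_eq, maxf_eq, List.getD_cons_zero]
      have hmem : (c :: t).getD ((c :: t).length - 1) ' ' ∈ c :: t := by
        have hlt : (c :: t).length - 1 < (c :: t).length := by simp
        rw [List.getD_eq_getElem _ _ hlt]
        exact List.getElem_mem _
      have hmin : (c :: t).foldl min c = t.foldl min c := by
        rw [List.foldl_cons, min_self]
      have hmax : (c :: t).foldl max ((c :: t).getD ((c :: t).length - 1) ' ') =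
          t.foldl max c := by
        rw [List.foldl_cons]
        exact fold_max_seed c _ t hmem
      rw [hmin, hmax]
      rw [foldl_add_one, PySem.List.length_pyRange_one, Int.toNat_eq_max]
      rw [zero_add]
      exact max_comm _ _

-- ===== VERDICT (by name: the statement is the Claim_ definition above) =====
theorem sottoseqdecrescente_spec : Claim_equal_sottoseqdecrescente := by
  intro lista _
  unfold Spec_sottoseqdecrescente sottoseqdecrescente sottoseqdecrescente_alt
  by_cases hn : lista.length ≤ 2
  · rw [if_pos hn, if_pos hn]
  · rw [if_neg hn, if_neg hn]
    dsimp only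
    obtain ⟨habs, hlen⟩ := outer_corr lista (lista.length - 1) 1 rfl le_rfl [] (-1) none 0 rfl
      (by simp [absS, omap])
    by_cases hlt : (outerA lista 1 []).length < 2
    · rw [if_pos hlt, if_pos (by rw [← hlen]; exact hlt)]
    · have h2 : ¬ (outerB lista 1 (-1) none 0).2.2 < 2 := by rw [← hlen]; exact hlt
      rw [if_neg hlt, if_neg h2]
      have hne : outerA lista 1 [] ≠ [] := by
        intro h
        rw [h] at hlt
        simp at hlt
      rw [absS_of_ne_nil _ hne] at habs
      cases hbest : (outerB lista 1 (-1) none 0).2.1 with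
      | none =>
          exfalso
          rw [hbest] at habs
          have := congrArg Prod.snd habs
          simp [omap] at this
      | some q =>
          obtain ⟨lo, hi⟩ := q
          dsimp only
          have hseg : seg lista lo hi = (seqmax (outerA lista 1 [])).toList := by
            rw [hbest] at habs
            have := congrArg Prod.snd habs
            simp only [omap, Option.map_some] at this
            exact (Option.some.inj this).symm
          set cs := (seqmax (outerA lista 1 [])).toList with hcs
          have eA : (PySem.List.pyRange 0 (PySem.List.len cs)).foldl
              (fun p i =>
                (if PySem.List.pyGetD cs i ' ' < p.1 then PySem.List.pyGetD cs i ' ' else p.1,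
                 if PySem.List.pyGetD cs i ' ' > p.2 then PySem.List.pyGetD cs i ' ' else p.2))
              (cs.getD 0 ' ', cs.getD (cs.length - 1) ' ') =
              cs.foldl
                (fun p c => (if c < p.1 then c else p.1, if c > p.2 then c else p.2))
                (cs.getD 0 ' ', cs.getD (cs.length - 1) ' ') :=
            PySem.List.foldl_pyRange_pyGetD cs ' '
              (fun p c => (if c < p.1 then c else p.1, if c > p.2 then c else p.2))
              (cs.getD 0 ' ', cs.getD (cs.length - 1) ' ') le_rfl
          rw [eA]
          have eS : PySem.List.slice lista (some (lo : Int)) (some ((hi : Int) + 1)) =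
              (lista.drop lo).take (hi + 1 - lo) := by
            have hcast : ((hi : Int) + 1) = (((hi + 1 : Nat)) : Int) := by push_cast; ring
            rw [hcast, PySem.List.slice_natCast]
          rw [eS]
          rw [foldl_strings
            (fun (q : Option Char × Option Char) c =>
              ((match q.1 with
                | none => some c
                | some m => if c < m then some c else some m),
               (match q.2 with
                | none => some c
                | some m => if c > m then some c else some m)))
            ((lista.drop lo).take (hi + 1 - lo)) (none, none)]
          have eseg : ((((lista.drop lo).take (hi + 1 - lo)).map String.toList).flatten) = cs := by
            rw [← hseg]; rfl
          rw [eseg]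
          exact tail_eq cs
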